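-- pv_equiv track=rewrite | github.com/santhoshreddy73/hrview | HR_View/app/views.py | num2Indian_num_sys
-- ===== SOURCE A (Python) =====
-- def num2Indian_num_sys(number):
--     num=str(number)
--     l=len(num)
--     res=[]
--     x=list(num)
--     if l%2==0 and l>=4:
--         for i in range(len(x)):
--             if i!=len(x)-3:
--                 if i%2!=0 and i!=0:
--                     res.append(x[i])
--                 elif i==0:
--                     res.append(str(x[i]+','))
--                 else:
--                     res.append(x[i]+',')
--             else:
--                 res.append(str(x[i]+x[i+1]+x[i+2]))
--                 break
--         result=''.join(res)
--
--     elif l%2!=0 and l>3: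
--         for i in range(len(x)):
--             if i!=len(x)-3:
--                 if i%2==0:
--                     res.append(x[i])
--                 else:
--                     res.append(x[i]+',')
--             else:
--                 res.append(str(x[i]+x[i+1]+x[i+2]))
--                 break
--         result=''.join(res)
--
--     else:
--         result=num
--     return result
-- ===== SOURCE B (Python) =====
-- def num2Indian_num_sys(number):
--     s = str(number)
--     if len(s) <= 3:
--         return s
--     groups = [s[-3:]]
--     s = s[:-3]
--     while s:
--         groups.append(s[-2:])
--         s = s[:-2]
--     return ','.join(reversed(groups))
-- ===== Notes on version B (the rewrite author's own statement) =====
-- stated objective: simpler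
-- what changed: Replaces A's two index-parity loops (even/odd length with in-loop break and per-index comma decisions) by a single right-to-left peel: take the last three characters, then repeatedly peel two-character chunks off the prefix and join the collected groups with commas.
import Mathlib
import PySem

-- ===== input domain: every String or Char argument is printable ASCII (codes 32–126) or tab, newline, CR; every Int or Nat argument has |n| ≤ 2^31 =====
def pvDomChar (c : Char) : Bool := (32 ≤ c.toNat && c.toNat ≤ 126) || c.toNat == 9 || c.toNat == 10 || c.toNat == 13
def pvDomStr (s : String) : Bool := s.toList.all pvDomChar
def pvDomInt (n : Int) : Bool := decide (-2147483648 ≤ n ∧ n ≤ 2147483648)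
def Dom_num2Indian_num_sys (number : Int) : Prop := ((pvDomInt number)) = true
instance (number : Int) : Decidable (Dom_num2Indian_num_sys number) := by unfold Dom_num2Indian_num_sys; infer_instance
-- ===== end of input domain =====

-- B replaces A's two index-parity loops by one right-to-left peel (last three chars, then
-- two-char chunks off the prefix, joined with commas): simpler decomposition, same O(n) cost.

-- ===== PORT A =====
-- the even-length for-loop of A (branch l%2==0 and l>=4); res entries are char lists, ''.join = flatten.
-- x.getD _ ' ' renders x[i]: at every index this loop reads, i < len(x) (i ranges over range(len(x))
-- and the break reads i+1, i+2 with i = len(x)-3), so the default is never used.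
def pvLoopEven (x : List Char) (i : Nat) (res : List (List Char)) : List (List Char) :=
  if _h : i < x.length then
    if i ≠ x.length - 3 then
      if i % 2 ≠ 0 ∧ i ≠ 0 then
        pvLoopEven x (i+1) (res ++ [[x.getD i ' ']])
      else if i = 0 then
        pvLoopEven x (i+1) (res ++ [[x.getD i ' ', ',']])
      else
        pvLoopEven x (i+1) (res ++ [[x.getD i ' ', ',']])
    else
      res ++ [[x.getD i ' ', x.getD (i+1) ' ', x.getD (i+2) ' ']]   -- break
  else res
termination_by x.length - i

-- the odd-length for-loop of A (branch l%2!=0 and l>3)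
def pvLoopOdd (x : List Char) (i : Nat) (res : List (List Char)) : List (List Char) :=
  if _h : i < x.length then
    if i ≠ x.length - 3 then
      if i % 2 = 0 then
        pvLoopOdd x (i+1) (res ++ [[x.getD i ' ']])
      else
        pvLoopOdd x (i+1) (res ++ [[x.getD i ' ', ',']])
    else
      res ++ [[x.getD i ' ', x.getD (i+1) ' ', x.getD (i+2) ' ']]   -- break
  else res
termination_by x.length - i

def pvACore (num : String) : String :=
  let x := num.toList
  let l := x.length
  if l % 2 = 0 ∧ 4 ≤ l then String.ofList (pvLoopEven x 0 []).flatten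
  else if l % 2 ≠ 0 ∧ 3 < l then String.ofList (pvLoopOdd x 0 []).flatten
  else num

def num2Indian_num_sys (number : Int) : String :=
  pvACore (PySem.Int.toStr number)

-- ===== PORT B =====
-- Source B's while loop: peel two-char chunks off the right of s, appending each to groups.
-- s[-2:] / s[:-2] are drop (len-2) / take (len-2): exact here (Nat subtraction clamps at 0
-- exactly as Python's negative-bound slices clamp for len < 2).
def pvChunkLoop (s : List Char) (groups : List (List Char)) : List (List Char) :=
  if h : s = [] then groups
  else pvChunkLoop (s.take (s.length - 2)) (groups ++ [s.drop (s.length - 2)])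
termination_by s.length
decreasing_by
  have : s.length ≠ 0 := fun hz => h (List.eq_nil_of_length_eq_zero hz)
  simp [List.length_take]; omega

def pvBCore (s : String) : String :=
  let cs := s.toList
  if cs.length ≤ 3 then s
  else
    -- groups = [s[-3:]] then the chunks; ','.join(reversed(groups))
    String.ofList (List.intercalate [','] (pvChunkLoop (cs.take (cs.length - 3)) [cs.drop (cs.length - 3)]).reverse)

def num2Indian_num_sys_alt (number : Int) : String :=
  pvBCore (PySem.Int.toStr number)

-- ===== PRECONDITION & SPEC =====
def Spec_num2Indian_num_sys (number : Int) (out : String) : Prop := out = num2Indian_num_sys_alt number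
instance (number : Int) (out : String) : Decidable (Spec_num2Indian_num_sys number out) := by unfold Spec_num2Indian_num_sys; infer_instance

-- ===== CLAIM (what is proved, stated in full; the proofs are below) =====
def Claim_equal_num2Indian_num_sys : Prop := ∀ (number : Int), Dom_num2Indian_num_sys number → Spec_num2Indian_num_sys number (num2Indian_num_sys number)

-- ===== LEMMAS AND PROOFS =====

-- list-level views of the two results (proof helpers only)
def gA (cs : List Char) : List Char :=
  if cs.length % 2 = 0 ∧ 4 ≤ cs.length then (pvLoopEven cs 0 []).flatten
  else if cs.length % 2 ≠ 0 ∧ 3 < cs.length then (pvLoopOdd cs 0 []).flatten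
  else cs

def gB (cs : List Char) : List Char :=
  if cs.length ≤ 3 then cs
  else List.intercalate [','] (pvChunkLoop (cs.take (cs.length - 3)) [cs.drop (cs.length - 3)]).reverse

theorem loopOdd_acc (x : List Char) : ∀ n i res, x.length - i ≤ n →
    pvLoopOdd x i res = res ++ pvLoopOdd x i [] := by
  intro n
  induction n with
  | zero =>
    intro i res h
    have : ¬ i < x.length := by omega
    rw [pvLoopOdd]
    conv_rhs => rw [pvLoopOdd]
    simp [this]
  | succ n ih =>
    intro i res h
    rw [pvLoopOdd]
    conv_rhs => rw [pvLoopOdd]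
    by_cases hi : i < x.length
    · simp only [hi, dif_pos]
      simp only [List.nil_append]
      split
      · split
        · rw [ih (i+1) _ (by omega), ih (i+1) ([[x.getD i ' ']]) (by omega)]
          simp
        · rw [ih (i+1) _ (by omega), ih (i+1) ([[x.getD i ' ', ',']]) (by omega)]
          simp
      · simp
    · simp [hi]

theorem loopEven_shift (c : Char) (t : List Char) (ht : 3 ≤ t.length) :
    ∀ n i res, t.length - i ≤ n → pvLoopEven (c :: t) (i+1) res = pvLoopOdd t i res := by
  intro n
  induction n with
  | zero =>
    intro i res h
    rw [pvLoopEven, pvLoopOdd]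
    have h1 : ¬ i + 1 < (c :: t).length := by simp; omega
    have h2 : ¬ i < t.length := by omega
    simp [h1, h2]
  | succ n ih =>
    intro i res h
    rw [pvLoopEven, pvLoopOdd]
    by_cases hi : i < t.length
    · have hi' : i + 1 < (c :: t).length := by simp; omega
      simp only [hi, hi', dif_pos]
      by_cases hbr : i ≠ t.length - 3
      · have hbr' : i + 1 ≠ (c :: t).length - 3 := by simp; omega
        rw [if_pos hbr', if_pos hbr]
        by_cases hp : i % 2 = 0
        · have hp1 : (i+1) % 2 ≠ 0 ∧ i + 1 ≠ 0 := ⟨by omega, by omega⟩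
          rw [if_pos hp1, if_pos hp, List.getD_cons_succ]
          exact ih (i+1) _ (by omega)
        · have hp1 : ¬ ((i+1) % 2 ≠ 0 ∧ i + 1 ≠ 0) := by
            intro hx; exact hp (by omega)
          rw [if_neg hp1, if_neg (by omega : ¬ i + 1 = 0), if_neg hp, List.getD_cons_succ]
          exact ih (i+1) _ (by omega)
      · push_neg at hbr
        have hbr' : ¬ i + 1 ≠ (c :: t).length - 3 := by simp; omega
        rw [if_neg hbr', if_neg (by omega : ¬ i ≠ t.length - 3)]
        simp [List.getD_cons_succ]
    · have hi' : ¬ i + 1 < (c :: t).length := by simp; omega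
      simp [hi, hi']

theorem loopOdd_shift (a b : Char) (t : List Char) (ht : 3 ≤ t.length) :
    ∀ n i res, t.length - i ≤ n → pvLoopOdd (a :: b :: t) (i+2) res = pvLoopOdd t i res := by
  intro n
  induction n with
  | zero =>
    intro i res h
    have h1 : ¬ i + 2 < (a :: b :: t).length := by simp; omega
    have h2 : ¬ i < t.length := by omega
    rw [pvLoopOdd, dif_neg h1, pvLoopOdd, dif_neg h2]
  | succ n ih =>
    intro i res h
    rw [pvLoopOdd]
    conv_rhs => rw [pvLoopOdd]
    by_cases hi : i < t.length
    · have hi' : i + 2 < (a :: b :: t).length := by simp; omega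
      simp only [hi, hi', dif_pos]
      by_cases hbr : i ≠ t.length - 3
      · have hbr' : i + 2 ≠ (a :: b :: t).length - 3 := by simp; omega
        rw [if_pos hbr', if_pos hbr]
        by_cases hp : i % 2 = 0
        · rw [if_pos (by omega : (i+2) % 2 = 0), if_pos hp]
          have : (a :: b :: t).getD (i+2) ' ' = t.getD i ' ' := by
            simp [List.getD_cons_succ]
          rw [this]
          exact ih (i+1) _ (by omega)
        · rw [if_neg (by omega : ¬ (i+2) % 2 = 0), if_neg hp]
          have : (a :: b :: t).getD (i+2) ' ' = t.getD i ' ' := by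
            simp [List.getD_cons_succ]
          rw [this]
          exact ih (i+1) _ (by omega)
      · push_neg at hbr
        have hbr' : ¬ i + 2 ≠ (a :: b :: t).length - 3 := by simp; omega
        rw [if_neg hbr', if_neg (by omega : ¬ i ≠ t.length - 3)]
        simp [List.getD_cons_succ]
    · have hi' : ¬ i + 2 < (a :: b :: t).length := by simp; omega
      simp [hi, hi']

theorem chunk_acc : ∀ n (s : List Char), s.length ≤ n → ∀ g,
    pvChunkLoop s g = g ++ pvChunkLoop s [] := by
  intro n
  induction n with
  | zero =>
    intro s h g
    have hs : s = [] := List.eq_nil_of_length_eq_zero (by omega)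
    subst hs
    rw [pvChunkLoop, dif_pos rfl, pvChunkLoop, dif_pos rfl]
    simp
  | succ n ih =>
    intro s h g
    by_cases hs : s = []
    · subst hs
      rw [pvChunkLoop, dif_pos rfl, pvChunkLoop, dif_pos rfl]
      simp
    · rw [pvChunkLoop, dif_neg hs]
      conv_rhs => rw [pvChunkLoop, dif_neg hs]
      have hl : (s.take (s.length - 2)).length ≤ n := by
        have : s.length ≠ 0 := fun hz => hs (List.eq_nil_of_length_eq_zero hz)
        simp [List.length_take]; omega
      rw [ih _ hl (g ++ [s.drop (s.length - 2)]), ih _ hl ([] ++ [s.drop (s.length - 2)])]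
      simp

theorem chunk_odd_front : ∀ n (p : List Char), p.length ≤ n → p.length % 2 = 0 → ∀ (c : Char) g,
    pvChunkLoop (c :: p) g = pvChunkLoop p g ++ [[c]] := by
  intro n
  induction n with
  | zero =>
    intro p h _ c g
    have hp : p = [] := List.eq_nil_of_length_eq_zero (by omega)
    subst hp
    rw [pvChunkLoop, dif_neg (by simp : ¬ ([c] : List Char) = [])]
    simp [pvChunkLoop]
  | succ n ih =>
    intro p h hev c g
    by_cases hp : p = []
    · subst hp
      rw [pvChunkLoop, dif_neg (by simp : ¬ ([c] : List Char) = [])]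
      simp [pvChunkLoop]
    · have h2 : 2 ≤ p.length := by
        have : p.length ≠ 0 := fun hz => hp (List.eq_nil_of_length_eq_zero hz)
        omega
      rw [pvChunkLoop, dif_neg (by simp : ¬ (c :: p) = [])]
      conv_rhs => rw [pvChunkLoop, dif_neg hp]
      have e1 : (c :: p).length - 2 = (p.length - 2) + 1 := by simp; omega
      rw [e1, List.take_succ_cons, List.drop_succ_cons]
      have hl : (p.take (p.length - 2)).length ≤ n := by simp [List.length_take]; omega
      have hev' : (p.take (p.length - 2)).length % 2 = 0 := by simp [List.length_take]; omega
      exact ih _ hl hev' c _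

theorem chunk_pair_front : ∀ n (p : List Char), p.length ≤ n → p.length % 2 = 0 → ∀ (a b : Char) g,
    pvChunkLoop (a :: b :: p) g = pvChunkLoop p g ++ [[a, b]] := by
  intro n
  induction n with
  | zero =>
    intro p h _ a b g
    have hp : p = [] := List.eq_nil_of_length_eq_zero (by omega)
    subst hp
    rw [pvChunkLoop, dif_neg (by simp : ¬ ([a, b] : List Char) = [])]
    simp [pvChunkLoop]
  | succ n ih =>
    intro p h hev a b g
    by_cases hp : p = []
    · subst hp
      rw [pvChunkLoop, dif_neg (by simp : ¬ ([a, b] : List Char) = [])]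
      simp [pvChunkLoop]
    · have h2 : 2 ≤ p.length := by
        have : p.length ≠ 0 := fun hz => hp (List.eq_nil_of_length_eq_zero hz)
        omega
      rw [pvChunkLoop, dif_neg (by simp : ¬ (a :: b :: p) = [])]
      conv_rhs => rw [pvChunkLoop, dif_neg hp]
      have e1 : (a :: b :: p).length - 2 = (p.length - 2) + 2 := by simp; omega
      rw [e1, List.take_succ_cons, List.take_succ_cons, List.drop_succ_cons, List.drop_succ_cons]
      have hl : (p.take (p.length - 2)).length ≤ n := by simp [List.length_take]; omega
      have hev' : (p.take (p.length - 2)).length % 2 = 0 := by simp [List.length_take]; omega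
      exact ih _ hl hev' a b _

theorem gA_odd_step (t : List Char) (h3 : 3 ≤ t.length) (hodd : t.length % 2 = 1) :
    (pvLoopOdd t 0 []).flatten = gA t := by
  by_cases h : t.length = 3
  · obtain ⟨a, b, c, rfl⟩ : ∃ a b c, t = [a, b, c] := by
      match t, h with
      | [a, b, c], _ => exact ⟨a, b, c, rfl⟩
    rw [pvLoopOdd]
    norm_num [gA]
  · unfold gA
    rw [if_neg (by omega), if_pos ⟨by omega, by omega⟩]

theorem gB_odd_step (t : List Char) (h3 : 3 ≤ t.length) :
    List.intercalate [','] (pvChunkLoop (t.take (t.length - 3)) [t.drop (t.length - 3)]).reverse = gB t := by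
  by_cases h : t.length = 3
  · rw [h]
    norm_num [gB, h]
    rw [pvChunkLoop, dif_pos rfl]
    simp [List.intercalate]
  · unfold gB
    rw [if_neg (by omega)]

theorem intercalate_cons_of_ne_nil (sep x : List Char) (l : List (List Char)) (h : l ≠ []) :
    List.intercalate sep (x :: l) = x ++ sep ++ List.intercalate sep l := by
  obtain ⟨y, l', rfl⟩ := List.exists_cons_of_ne_nil h
  simp [List.intercalate]

theorem chunk_ne_nil (p : List Char) (d : List Char) :
    (pvChunkLoop p [d]).reverse ≠ [] := by
  rw [chunk_acc p.length p le_rfl [d]]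
  simp

theorem gA_eq_gB : ∀ n (cs : List Char), cs.length ≤ n → gA cs = gB cs := by
  intro n
  induction n with
  | zero =>
    intro cs h
    have : cs = [] := List.eq_nil_of_length_eq_zero (by omega)
    subst this
    simp [gA, gB]
  | succ n ih =>
    intro cs h
    by_cases h3 : cs.length ≤ 3
    · unfold gA gB
      rw [if_neg (by omega), if_neg (by omega), if_pos h3]
    · by_cases hev : cs.length % 2 = 0
      -- even length ≥ 4: peel one leading char
      · obtain ⟨c, t, rfl⟩ := List.exists_cons_of_ne_nil (show cs ≠ [] by intro hz; rw [hz] at h3; simp at h3)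
        have ht3 : 3 ≤ t.length := by simp at h3 ⊢; omega
        have htodd : t.length % 2 = 1 := by simp at hev; omega
        -- A side
        have hA : gA (c :: t) = c :: ',' :: gA t := by
          rw [gA]
          rw [if_pos ⟨hev, by simp; omega⟩]
          rw [pvLoopEven, dif_pos (by simp; try omega), if_pos (by simp; try omega),
              if_neg (by simp), if_pos rfl]
          rw [loopEven_shift c t ht3 t.length 0 _ (by omega)]
          rw [loopOdd_acc t t.length 0 _ (by omega)]
          rw [List.flatten_append, gA_odd_step t ht3 htodd]
          simp
        -- B side
        have hB : gB (c :: t) = c :: ',' :: gB t := by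
          rw [gB]
          rw [if_neg h3]
          have e1 : (c :: t).length - 3 = (t.length - 3) + 1 := by simp; omega
          rw [e1, List.take_succ_cons, List.drop_succ_cons]
          rw [chunk_odd_front (t.take (t.length - 3)).length _ le_rfl
              (by simp [List.length_take]; omega) c _]
          rw [List.reverse_append]
          simp only [List.reverse_cons, List.reverse_nil, List.nil_append, List.singleton_append]
          rw [intercalate_cons_of_ne_nil _ _ _ (chunk_ne_nil _ _)]
          rw [gB_odd_step t ht3]
          simp
        rw [hA, hB, ih t (by simp at h; omega)]
      -- odd length ≥ 5: peel two leading chars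
      · obtain ⟨a, t0, rfl⟩ := List.exists_cons_of_ne_nil (show cs ≠ [] by intro hz; rw [hz] at h3; simp at h3)
        obtain ⟨b, t, rfl⟩ := List.exists_cons_of_ne_nil
          (show t0 ≠ [] by intro hz; rw [hz] at h3; simp at h3)
        have ht3 : 3 ≤ t.length := by simp at h3 hev ⊢; omega
        have htodd : t.length % 2 = 1 := by simp at hev; omega
        have hA : gA (a :: b :: t) = a :: b :: ',' :: gA t := by
          rw [gA]
          rw [if_neg (by simp; try omega), if_pos ⟨by simp; try omega, by simp; try omega⟩]
          rw [pvLoopOdd, dif_pos (by simp; try omega), if_pos (by simp; try omega), if_pos (by norm_num)]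
          rw [pvLoopOdd, dif_pos (by simp; try omega), if_pos (by simp; try omega), if_neg (by norm_num)]
          rw [loopOdd_shift a b t ht3 t.length 0 _ (by omega)]
          rw [loopOdd_acc t t.length 0 _ (by omega)]
          rw [List.flatten_append, gA_odd_step t ht3 htodd]
          simp
        have hB : gB (a :: b :: t) = a :: b :: ',' :: gB t := by
          rw [gB]
          rw [if_neg h3]
          have e1 : (a :: b :: t).length - 3 = (t.length - 3) + 2 := by simp; omega
          rw [e1, List.take_succ_cons, List.take_succ_cons, List.drop_succ_cons, List.drop_succ_cons]
          rw [chunk_pair_front (t.take (t.length - 3)).length _ le_rfl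
              (by simp [List.length_take]; omega) a b _]
          rw [List.reverse_append]
          simp only [List.reverse_cons, List.reverse_nil, List.nil_append, List.singleton_append]
          rw [intercalate_cons_of_ne_nil _ _ _ (chunk_ne_nil _ _)]
          rw [gB_odd_step t ht3]
          simp
        rw [hA, hB, ih t (by simp at h; omega)]

theorem core_eq (s : String) : pvACore s = pvBCore s := by
  unfold pvACore pvBCore
  by_cases h3 : s.toList.length ≤ 3
  · rw [if_neg (by omega), if_neg (by omega), if_pos h3]
  · have hg := gA_eq_gB s.toList.length s.toList le_rfl
    unfold gA gB at hg
    rw [if_neg h3] at hg ⊢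
    by_cases hev : s.toList.length % 2 = 0
    · rw [if_pos ⟨hev, by omega⟩] at hg ⊢
      rw [hg]
    · rw [if_neg (by omega), if_pos ⟨by omega, by omega⟩] at hg ⊢
      rw [hg]

-- ===== VERDICT (by name: the statement is the Claim_ definition above) =====
theorem num2Indian_num_sys_spec : Claim_equal_num2Indian_num_sys := by
  intro number _
  unfold Spec_num2Indian_num_sys num2Indian_num_sys num2Indian_num_sys_alt
  exact core_eq _
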